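-- pv_equiv track=rewrite | github.com/modrzejewski/gammcor-integrals | src/integrals/Auto2e/Auto2e.py | tuvindices
-- ===== SOURCE A (Python) =====
-- def tuvindices(MaxIndex):
--     """ Indices of the Rtuv and Stuv matrices """
--     TUVIdx = {}
--     Idx = 1
--     for v in range(MaxIndex+1):
--         for u in range(MaxIndex-v+1):
--             for t in range(MaxIndex-v-u+1):
--                 TUVIdx[(t, u, v)] = Idx
--                 Idx += 1
--     return TUVIdx
-- ===== SOURCE B (Python) =====
-- def tuvindices(MaxIndex):
--     """ Indices of the Rtuv and Stuv matrices """
--     M = MaxIndex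
--
--     def tet(k):
--         # tet(k) = C(k+2, 3): number of triples (t, u, v) of naturals with t+u+v < k
--         return k * (k + 1) * (k + 2) // 6
--
--     return {
--         (t, u, v): 1 + t + u * (M - v + 1) - u * (u - 1) // 2 + tet(M + 1) - tet(M + 1 - v)
--         for v in range(M + 1)
--         for u in range(M - v + 1)
--         for t in range(M - v - u + 1)
--     }
-- ===== Notes on version B (the rewrite author's own statement) =====
-- stated objective: alternative
-- what changed: Replaces A's stateful running counter Idx threaded through three nested loops by a closed-form index formula (row offset via a triangular number plus a tetrahedral-number base per v) computed independently for each triple inside a single dict comprehension.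
import Mathlib
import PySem

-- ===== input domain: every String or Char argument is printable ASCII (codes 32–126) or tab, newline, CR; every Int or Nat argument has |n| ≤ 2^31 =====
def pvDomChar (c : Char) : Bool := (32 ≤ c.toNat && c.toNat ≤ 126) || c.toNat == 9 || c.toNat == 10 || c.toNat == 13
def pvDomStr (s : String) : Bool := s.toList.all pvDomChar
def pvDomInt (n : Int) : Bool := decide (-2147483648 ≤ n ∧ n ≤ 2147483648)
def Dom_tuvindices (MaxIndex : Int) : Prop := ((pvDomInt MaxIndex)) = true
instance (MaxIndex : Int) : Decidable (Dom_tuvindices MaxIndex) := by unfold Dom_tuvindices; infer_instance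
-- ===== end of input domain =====

-- B replaces A's running counter by a closed-form (triangular/tetrahedral) index formula per
-- triple, built as one dict comprehension instead of a stateful triple loop (objective: alternative).

-- ===== PORT A =====
-- A's dict keys (t, u, v) are pairwise distinct and always fresh, so every dict insert appends;
-- the association list is carried directly in the flattened output shape (t, u, v, idx),
-- threaded together with the running counter Idx (initially 1).
def tuvindices (MaxIndex : Int) : List (Int × Int × Int × Int) :=
  ((PySem.List.pyRange 0 (MaxIndex + 1) 1).foldl (fun st v =>
      (PySem.List.pyRange 0 (MaxIndex - v + 1) 1).foldl (fun st u =>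
        (PySem.List.pyRange 0 (MaxIndex - v - u + 1) 1).foldl
          (fun (st : List (Int × Int × Int × Int) × Int) t =>
            (st.1 ++ [(t, u, v, st.2)], st.2 + 1)) st) st)
    (([] : List (Int × Int × Int × Int)), (1 : Int))).1

-- ===== PORT B =====
-- tet k = k*(k+1)*(k+2) // 6, exactly Source B's helper ('//' is PySem.Int.floordiv)
def pvTet (k : Int) : Int := PySem.Int.floordiv (k * (k + 1) * (k + 2)) 6

def tuvindices_alt (MaxIndex : Int) : List (Int × Int × Int × Int) :=
  (PySem.List.pyRange 0 (MaxIndex + 1) 1).flatMap (fun v =>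
    (PySem.List.pyRange 0 (MaxIndex - v + 1) 1).flatMap (fun u =>
      (PySem.List.pyRange 0 (MaxIndex - v - u + 1) 1).map (fun t =>
        (t, u, v,
          1 + t + u * (MaxIndex - v + 1) - PySem.Int.floordiv (u * (u - 1)) 2
            + pvTet (MaxIndex + 1) - pvTet (MaxIndex + 1 - v)))))

-- ===== PRECONDITION & SPEC =====
def Spec_tuvindices (MaxIndex : Int) (out : List (Int × Int × Int × Int)) : Prop := out = tuvindices_alt MaxIndex
instance (MaxIndex : Int) (out : List (Int × Int × Int × Int)) : Decidable (Spec_tuvindices MaxIndex out) := by unfold Spec_tuvindices; infer_instance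

-- ===== CLAIM (what is proved, stated in full; the proofs are below) =====
def Claim_equal_tuvindices : Prop := ∀ (MaxIndex : Int), Dom_tuvindices MaxIndex → Spec_tuvindices MaxIndex (tuvindices MaxIndex)

-- ===== LEMMAS AND PROOFS =====

-- every product of two consecutive integers is even
lemma pv_two_dvd (k : Int) : (2 : Int) ∣ k * (k + 1) := by
  rcases Int.even_or_odd k with ⟨m, hm⟩ | ⟨m, hm⟩
  · exact ⟨m * (k + 1), by subst hm; ring⟩
  · exact ⟨k * (m + 1), by subst hm; ring⟩

-- every product of three consecutive integers is divisible by 6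
lemma pv_six_dvd (k : Int) : (6 : Int) ∣ k * (k + 1) * (k + 2) := by
  obtain ⟨m, r, hr, hk⟩ : ∃ m r, (r = 0 ∨ r = 1 ∨ r = 2 ∨ r = 3 ∨ r = 4 ∨ r = 5) ∧ k = 6 * m + r :=
    ⟨k / 6, k % 6, by omega, by omega⟩
  subst hk
  rcases hr with h | h | h | h | h | h <;> subst h
  · exact ⟨m * (6 * m + 1) * (6 * m + 2), by ring⟩
  · exact ⟨(6 * m + 1) * (3 * m + 1) * (2 * m + 1), by ring⟩
  · exact ⟨(3 * m + 1) * (2 * m + 1) * (6 * m + 4), by ring⟩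
  · exact ⟨(2 * m + 1) * (3 * m + 2) * (6 * m + 5), by ring⟩
  · exact ⟨(3 * m + 2) * (6 * m + 5) * (2 * m + 2), by ring⟩
  · exact ⟨(6 * m + 5) * (m + 1) * (6 * m + 7), by ring⟩

-- exact halving: floordiv (2*m) 2 = m
lemma pv_fd_two (m : Int) : PySem.Int.floordiv (2 * m) 2 = m := by
  rw [PySem.Int.floordiv_eq_ediv_of_pos (by norm_num)]
  exact Int.mul_ediv_cancel_left m (by norm_num)

lemma pv_fd_six (m : Int) : PySem.Int.floordiv (6 * m) 6 = m := by
  rw [PySem.Int.floordiv_eq_ediv_of_pos (by norm_num)]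
  exact Int.mul_ediv_cancel_left m (by norm_num)

-- A1: the u-row offset recurrence
lemma pv_rowoff_step (u : Int) :
    PySem.Int.floordiv ((u + 1) * u) 2 = PySem.Int.floordiv (u * (u - 1)) 2 + u := by
  obtain ⟨m, hm⟩ := pv_two_dvd (u - 1)
  have h1 : u * (u - 1) = 2 * m := by linarith [hm]
  have h2 : (u + 1) * u = 2 * (m + u) := by nlinarith [hm]
  rw [h1, h2, pv_fd_two, pv_fd_two]

-- A2: tetrahedral difference is a triangle number
lemma pv_tet_step (k : Int) :
    pvTet (k + 1) = pvTet k + PySem.Int.floordiv ((k + 1) * (k + 2)) 2 := by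
  obtain ⟨m, hm⟩ := pv_six_dvd k
  obtain ⟨c, hc⟩ := pv_two_dvd (k + 1)
  have h1 : (k + 1) * (k + 2) = 2 * c := by linarith [hc]
  have h2 : (k + 1) * (k + 1 + 1) * (k + 1 + 2) = 6 * (m + c) := by nlinarith [hm, hc]
  unfold pvTet
  rw [hm, h2, pv_fd_six, pv_fd_six, h1, pv_fd_two]

-- A3: the full row offset at u = k equals the triangle number
lemma pv_rowoff_full (k : Int) :
    k * k - PySem.Int.floordiv (k * (k - 1)) 2 = PySem.Int.floordiv (k * (k + 1)) 2 := by
  obtain ⟨m, hm⟩ := pv_two_dvd (k - 1)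
  have h1 : k * (k - 1) = 2 * m := by linarith [hm]
  have h2 : k * (k + 1) = 2 * (m + k) := by nlinarith [hm]
  rw [h1, h2, pv_fd_two, pv_fd_two]
  nlinarith [hm]

-- generic shape of all three of A's loops: each iteration appends a block that depends only on
-- the loop variable and the running counter, and bumps the counter; ctr tracks the counter.
lemma pv_rangeBlocks {α : Type} (body : (List α × Int) → Int → (List α × Int))
    (blk : Int → Int → List α) (len ctr : Int → Int) :
    ∀ (n : Nat) (a : Int) (L : List α),
      (∀ p t, a ≤ t → t < a + n → body p t = (p.1 ++ blk t p.2, p.2 + len t)) →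
      (∀ t, a ≤ t → t < a + n → ctr (t + 1) = ctr t + len t) →
      (PySem.List.pyRange a (a + n) 1).foldl body (L, ctr a)
        = (L ++ (PySem.List.pyRange a (a + n) 1).flatMap (fun t => blk t (ctr t)), ctr (a + n)) := by
  intro n
  induction n with
  | zero =>
    intro a L _ _
    simp
  | succ n ih =>
    intro a L hb hc
    have hcast : a + ((n + 1 : Nat) : Int) = (a + 1) + (n : Nat) := by push_cast; ring
    rw [hcast, PySem.List.pyRange_one_cons (by omega : a < (a + 1) + (n : Nat))]
    simp only [List.foldl_cons, List.flatMap_cons]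
    rw [hb (L, ctr a) a le_rfl (by omega)]
    rw [show ctr a + len a = ctr (a + 1) from (hc a le_rfl (by omega)).symm]
    rw [ih (a + 1) (L ++ blk a (ctr a))
      (fun p t h1 h2 => hb p t (by omega) (by omega))
      (fun t h1 h2 => hc t (by omega) (by omega))]
    simp [List.append_assoc]

-- same lemma for an arbitrary (possibly empty) range a..b
lemma pv_rangeBlocks' {α : Type} (body : (List α × Int) → Int → (List α × Int))
    (blk : Int → Int → List α) (len ctr : Int → Int) (a b : Int) (L : List α) (c : Int) (hab : a ≤ b) (hc0 : ctr a = c)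
    (hb : ∀ p t, a ≤ t → t < b → body p t = (p.1 ++ blk t p.2, p.2 + len t))
    (hc : ∀ t, a ≤ t → t < b → ctr (t + 1) = ctr t + len t) :
    (PySem.List.pyRange a b 1).foldl body (L, c)
      = (L ++ (PySem.List.pyRange a b 1).flatMap (fun t => blk t (ctr t)), ctr b) := by
  subst hc0
  have hn : b = a + ((b - a).toNat : Int) := by omega
  rw [hn] at hb hc ⊢
  exact pv_rangeBlocks body blk len ctr (b - a).toNat a L hb hc

lemma pv_fd_zero : PySem.Int.floordiv 0 2 = 0 := by decide

-- ===== VERDICT (by name: the statement is the Claim_ definition above) =====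
theorem tuvindices_spec : Claim_equal_tuvindices := by
  intro M _
  unfold Spec_tuvindices tuvindices tuvindices_alt
  by_cases hM : 0 ≤ M + 1
  · have hmain := pv_rangeBlocks'
      (body := fun st v => (PySem.List.pyRange 0 (M - v + 1) 1).foldl (fun st u =>
        (PySem.List.pyRange 0 (M - v - u + 1) 1).foldl
          (fun (st : List (Int × Int × Int × Int) × Int) t =>
            (st.1 ++ [(t, u, v, st.2)], st.2 + 1)) st) st)
      (blk := fun v c => (PySem.List.pyRange 0 (M - v + 1) 1).flatMap (fun u =>
        (PySem.List.pyRange 0 (M - v - u + 1) 1).flatMap (fun t =>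
          [(t, u, v, c + (u * (M - v + 1) - PySem.Int.floordiv (u * (u - 1)) 2) + t)])))
      (len := fun v => ((M - v + 1) * (M - v + 1)
          - PySem.Int.floordiv ((M - v + 1) * ((M - v + 1) - 1)) 2))
      (ctr := fun v => 1 + (pvTet (M + 1) - pvTet (M + 1 - v)))
      (a := 0) (b := M + 1) (L := []) (c := 1) hM
      (by norm_num)
      (by
        intro p v _ hv2
        exact pv_rangeBlocks'
          (body := fun st u => (PySem.List.pyRange 0 (M - v - u + 1) 1).foldl
            (fun (st : List (Int × Int × Int × Int) × Int) t =>
              (st.1 ++ [(t, u, v, st.2)], st.2 + 1)) st)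
          (blk := fun u c => (PySem.List.pyRange 0 (M - v - u + 1) 1).flatMap (fun t =>
            [(t, u, v, c + t)]))
          (len := fun u => M - v - u + 1)
          (ctr := fun u => p.2 + (u * (M - v + 1) - PySem.Int.floordiv (u * (u - 1)) 2))
          (a := 0) (b := M - v + 1) (L := p.1) (c := p.2) (by omega)
          (by norm_num [pv_fd_zero])
          (by
            intro q u _ hu2
            exact pv_rangeBlocks'
              (body := fun (st : List (Int × Int × Int × Int) × Int) t =>
                (st.1 ++ [(t, u, v, st.2)], st.2 + 1))
              (blk := fun t c => [(t, u, v, c)])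
              (len := fun _ => 1)
              (ctr := fun t => q.2 + t)
              (a := 0) (b := M - v - u + 1) (L := q.1) (c := q.2) (by omega)
              (by norm_num)
              (fun r t _ _ => rfl)
              (fun t _ _ => by ring))
          (by
            intro u _ _
            simp only [add_sub_cancel_right]
            rw [pv_rowoff_step]
            ring))
      (by
        intro v _ hv2
        simp only
        rw [show M + 1 - (v + 1) = M - v from by ring, show M + 1 - v = (M - v) + 1 from by ring]
        have h1 := pv_tet_step (M - v)
        have h2 := pv_rowoff_full (M - v + 1)
        ring_nf at h1 h2 ⊢
        linarith [h1, h2])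
    rw [hmain]
    simp only [List.nil_append]
    congr 1
    funext v
    congr 1
    funext u
    rw [← List.map_eq_flatMap]
    congr 1
    funext t
    simp only [Prod.mk.injEq, true_and]
    ring
  · rw [PySem.List.pyRange_one_eq_nil (by omega)]
    simp
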